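-- pv_equiv track=rewrite | github.com/StBenedictPrayForUs/PDF-Edit-From-Context-Menu | app/pdf_ops.py | compute_sections
-- ===== SOURCE A (Python) =====
-- from typing import Callable, Iterable
--
-- def compute_sections(page_count: int, split_starts: Iterable[int]) -> list[tuple[int, int]]:
--     if page_count <= 0:
--         return []
--
--     starts = {1}
--     for page in split_starts:
--         if 1 <= page <= page_count:
--             starts.add(page)
--
--     ordered = sorted(starts)
--     sections: list[tuple[int, int]] = []
--     for idx, start in enumerate(ordered):
--         end = ordered[idx + 1] - 1 if idx + 1 < len(ordered) else page_count
--         sections.append((start, end))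
--     return sections
-- ===== SOURCE B (Python) =====
-- def compute_sections(page_count, split_starts):
--     # One pass over the sorted raw split list with a running section start;
--     # no set is built and no index pairing is needed.
--     if page_count <= 0:
--         return []
--     sections = []
--     cur = 1
--     for s in sorted(split_starts):
--         if 1 <= s <= page_count and cur < s:
--             sections.append((cur, s - 1))
--             cur = s
--     sections.append((cur, page_count))
--     return sections
-- ===== Notes on version B (the rewrite author's own statement) =====
-- stated objective: simpler
-- what changed: B drops the set and the index-based pairing: it sorts the raw split list once and emits sections in a single scan with a running current start, skipping duplicates and out-of-range values on the fly.
import Mathlib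
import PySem

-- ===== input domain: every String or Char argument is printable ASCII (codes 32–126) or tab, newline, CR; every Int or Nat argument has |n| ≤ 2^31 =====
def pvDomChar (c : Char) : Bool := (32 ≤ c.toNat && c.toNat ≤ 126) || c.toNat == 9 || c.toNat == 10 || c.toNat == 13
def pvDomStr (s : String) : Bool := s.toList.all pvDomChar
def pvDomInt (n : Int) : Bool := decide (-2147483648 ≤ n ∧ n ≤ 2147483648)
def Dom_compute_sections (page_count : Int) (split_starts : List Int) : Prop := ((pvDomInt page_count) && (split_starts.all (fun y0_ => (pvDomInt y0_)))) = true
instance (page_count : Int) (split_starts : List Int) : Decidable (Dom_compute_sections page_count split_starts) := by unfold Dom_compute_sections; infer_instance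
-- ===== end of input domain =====

-- B replaces A's set-plus-sort-plus-index pairing by one scan over the sorted raw split list
-- with a running current start (objective: simpler; same asymptotic cost).

-- ===== PORT A =====
def compute_sections (page_count : Int) (split_starts : List Int) : List (Int × Int) :=
  if page_count ≤ 0 then []
  else
    let starts : PySem.Set Int :=
      split_starts.foldl
        (fun st page => if 1 ≤ page ∧ page ≤ page_count then PySem.Set.add st page else st)
        (PySem.Set.ofList [1])
    let ordered := PySem.List.sorted starts (fun x => x) false
    (PySem.List.enumerate ordered).foldl
      (fun sections p =>
        sections ++ [(p.2,
          if p.1 + 1 < (ordered.length : Int) then PySem.List.pyGetD ordered (p.1 + 1) 0 - 1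
          else page_count)])
      []

-- ===== PORT B =====
def compute_sections_alt (page_count : Int) (split_starts : List Int) : List (Int × Int) :=
  if page_count ≤ 0 then []
  else
    let r :=
      (PySem.List.sorted split_starts (fun x => x) false).foldl
        (fun (st : List (Int × Int) × Int) s =>
          if 1 ≤ s ∧ s ≤ page_count ∧ st.2 < s then (st.1 ++ [(st.2, s - 1)], s) else st)
        ([], 1)
    r.1 ++ [(r.2, page_count)]

-- ===== PRECONDITION & SPEC =====
def Spec_compute_sections (page_count : Int) (split_starts : List Int) (out : List (Int × Int)) : Prop := out = compute_sections_alt page_count split_starts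
instance (page_count : Int) (split_starts : List Int) (out : List (Int × Int)) : Decidable (Spec_compute_sections page_count split_starts out) := by unfold Spec_compute_sections; infer_instance

-- ===== CLAIM (what is proved, stated in full; the proofs are below) =====
def Claim_equal_compute_sections : Prop := ∀ (page_count : Int) (split_starts : List Int), Dom_compute_sections page_count split_starts → Spec_compute_sections page_count split_starts (compute_sections page_count split_starts)

-- ===== LEMMAS AND PROOFS =====

-- canonical section list of a list of starts: pair each start with (next start - 1), last with pc
def pvPairs (pc : Int) : List Int → List (Int × Int)
  | [] => []
  | [x] => [(x, pc)]
  | x :: y :: r => (x, y - 1) :: pvPairs pc (y :: r)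

-- recursive form of B's loop
def pvG (pc cur : Int) : List Int → List (Int × Int)
  | [] => [(cur, pc)]
  | s :: r => if 1 ≤ s ∧ s ≤ pc ∧ cur < s then (cur, s - 1) :: pvG pc s r else pvG pc cur r

-- the strictly increasing in-range subsequence B's scan selects
def pvSd (pc cur : Int) : List Int → List Int
  | [] => []
  | s :: r => if 1 ≤ s ∧ s ≤ pc ∧ cur < s then s :: pvSd pc s r else pvSd pc cur r

lemma pvG_eq_pairs (pc : Int) (M : List Int) : ∀ cur, pvG pc cur M = pvPairs pc (cur :: pvSd pc cur M) := by
  induction M with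
  | nil => intro cur; simp [pvG, pvSd, pvPairs]
  | cons s r ih =>
    intro cur
    by_cases h : 1 ≤ s ∧ s ≤ pc ∧ cur < s
    · simp only [pvG, pvSd, if_pos h, pvPairs, ih s]
    · simp only [pvG, pvSd, if_neg h, ih cur]

lemma pvB_loop (pc : Int) (M : List Int) : ∀ acc cur,
    (M.foldl (fun (st : List (Int × Int) × Int) s =>
        if 1 ≤ s ∧ s ≤ pc ∧ st.2 < s then (st.1 ++ [(st.2, s - 1)], s) else st) (acc, cur)).1
      ++ [((M.foldl (fun (st : List (Int × Int) × Int) s =>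
        if 1 ≤ s ∧ s ≤ pc ∧ st.2 < s then (st.1 ++ [(st.2, s - 1)], s) else st) (acc, cur)).2, pc)]
      = acc ++ pvG pc cur M := by
  induction M with
  | nil => intro acc cur; simp [pvG]
  | cons s r ih =>
    intro acc cur
    by_cases h : 1 ≤ s ∧ s ≤ pc ∧ cur < s
    · rw [List.foldl_cons, if_pos h, ih (acc ++ [(cur, s - 1)]) s]
      simp only [pvG, if_pos h, List.append_assoc, List.singleton_append]
    · rw [List.foldl_cons, if_neg h, ih acc cur]
      simp only [pvG, if_neg h]

lemma pvA_loop (pc : Int) (L : List Int) : ∀ (T : List Int) (k : Nat) (acc : List (Int × Int)),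
    L.drop k = T →
    (PySem.List.enumerate T (k : Int)).foldl
      (fun sections p =>
        sections ++ [(p.2,
          if p.1 + 1 < (L.length : Int) then PySem.List.pyGetD L (p.1 + 1) 0 - 1 else pc)]) acc
      = acc ++ pvPairs pc T := by
  intro T
  induction T with
  | nil => intro k acc _; simp [pvPairs, PySem.List.enumerate]
  | cons x T' ih =>
    intro k acc hdrop
    have hk : k < L.length := by
      by_contra h
      simp [List.drop_eq_nil_of_le (Nat.le_of_not_lt h)] at hdrop
    have hdrop' : L.drop (k + 1) = T' := by
      have h1 : (L.drop k).tail = T' := by rw [hdrop]; rfl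
      rwa [List.tail_drop] at h1
    rw [PySem.List.enumerate_cons]
    cases T' with
    | nil =>
      have hlen : L.length = k + 1 := by
        have h1 : L.length - (k+1) = 0 := by
          have := congrArg List.length hdrop'
          simpa using this
        omega
      have hguard : ¬ ((k : Int) + 1 < (L.length : Int)) := by
        rw [hlen]; push_cast; omega
      simp [List.foldl_cons, if_neg hguard, PySem.List.enumerate, pvPairs]
    | cons y r =>
      have hk1 : k + 1 < L.length := by
        have := congrArg List.length hdrop'
        simp at this
        omega
      have hget : L[k + 1]'hk1 = y := by
        have : (L.drop (k+1))[0]'(by simp [hdrop']) = y := by simp [hdrop']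
        simpa [List.getElem_drop] using this
      have hguard : ((k + 1 : Nat) : Int) < (L.length : Int) := by exact_mod_cast hk1
      have hgetD : PySem.List.pyGetD L ((k + 1 : Nat) : Int) 0 = y := by
        rw [PySem.List.pyGetD_natCast L (k + 1) 0, List.getD_eq_getElem L 0 hk1, hget]
      have hcast : ((k : Int) + 1) = ((k + 1 : Nat) : Int) := by push_cast; ring
      rw [List.foldl_cons, hcast, if_pos hguard, hgetD,
        ih (k + 1) (acc ++ [(x, y - 1)]) hdrop']
      simp [pvPairs]

lemma pv_mem_startsFold (pc : Int) (ss : List Int) : ∀ (st : PySem.Set Int) (x : Int),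
    x ∈ ss.foldl (fun st page => if 1 ≤ page ∧ page ≤ pc then PySem.Set.add st page else st) st
      ↔ x ∈ st ∨ (x ∈ ss ∧ 1 ≤ x ∧ x ≤ pc) := by
  induction ss with
  | nil => intro st x; simp
  | cons s r ih =>
    intro st x
    by_cases h : 1 ≤ s ∧ s ≤ pc
    · rw [List.foldl_cons, if_pos h, ih]
      simp only [PySem.Set.mem_add, List.mem_cons]
      constructor
      · rintro ((hx | rfl) | hx)
        · exact Or.inl hx
        · exact Or.inr ⟨Or.inl rfl, h⟩
        · exact Or.inr ⟨Or.inr hx.1, hx.2⟩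
      · rintro (hx | ⟨(rfl | hx), hr⟩)
        · exact Or.inl (Or.inl hx)
        · exact Or.inl (Or.inr rfl)
        · exact Or.inr ⟨hx, hr⟩
    · rw [List.foldl_cons, if_neg h, ih]
      constructor
      · rintro (hx | hx)
        · exact Or.inl hx
        · exact Or.inr ⟨List.mem_cons_of_mem _ hx.1, hx.2⟩
      · rintro (hx | ⟨hm, hr⟩)
        · exact Or.inl hx
        · rcases List.mem_cons.mp hm with rfl | hm'
          · exact absurd hr h
          · exact Or.inr ⟨hm', hr⟩

lemma pv_nodup_startsFold (pc : Int) (ss : List Int) : ∀ (st : PySem.Set Int), st.Nodup →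
    (ss.foldl (fun st page => if 1 ≤ page ∧ page ≤ pc then PySem.Set.add st page else st) st).Nodup := by
  induction ss with
  | nil => intro st h; simpa using h
  | cons s r ih =>
    intro st h
    rw [List.foldl_cons]
    by_cases hc : 1 ≤ s ∧ s ≤ pc
    · rw [if_pos hc]; exact ih _ (PySem.Set.nodup_add st s h)
    · rw [if_neg hc]; exact ih _ h

lemma pv_mem_sd (pc : Int) (M : List Int) (hM : M.Pairwise (· ≤ ·)) : ∀ cur x,
    x ∈ pvSd pc cur M ↔ x ∈ M ∧ 1 ≤ x ∧ x ≤ pc ∧ cur < x := by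
  induction M with
  | nil => intro cur x; simp [pvSd]
  | cons s r ih =>
    intro cur x
    have hle : ∀ y ∈ r, s ≤ y := (List.pairwise_cons.mp hM).1
    have hr : r.Pairwise (· ≤ ·) := (List.pairwise_cons.mp hM).2
    by_cases h : 1 ≤ s ∧ s ≤ pc ∧ cur < s
    · rw [pvSd, if_pos h]
      simp only [List.mem_cons, ih hr]
      constructor
      · rintro (rfl | ⟨hm, h1, h2, h3⟩)
        · exact ⟨Or.inl rfl, h.1, h.2.1, h.2.2⟩
        · exact ⟨Or.inr hm, h1, h2, by omega⟩
      · rintro ⟨(rfl | hm), h1, h2, h3⟩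
        · exact Or.inl rfl
        · by_cases hxs : x = s
          · exact Or.inl hxs
          · exact Or.inr ⟨hm, h1, h2, lt_of_le_of_ne (hle x hm) (Ne.symm hxs)⟩
    · rw [pvSd, if_neg h]
      rw [ih hr]
      constructor
      · rintro ⟨hm, hrest⟩
        exact ⟨List.mem_cons_of_mem _ hm, hrest⟩
      · rintro ⟨hm, h1, h2, h3⟩
        rcases List.mem_cons.mp hm with rfl | hm'
        · exact absurd ⟨h1, h2, h3⟩ h
        · exact ⟨hm', h1, h2, h3⟩

lemma pv_sd_pairwise (pc : Int) (M : List Int) (hM : M.Pairwise (· ≤ ·)) : ∀ cur,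
    (pvSd pc cur M).Pairwise (· < ·) := by
  induction M with
  | nil => intro cur; simp [pvSd]
  | cons s r ih =>
    intro cur
    have hr : r.Pairwise (· ≤ ·) := (List.pairwise_cons.mp hM).2
    by_cases h : 1 ≤ s ∧ s ≤ pc ∧ cur < s
    · rw [pvSd, if_pos h, List.pairwise_cons]
      exact ⟨fun y hy => ((pv_mem_sd pc r hr s y).mp hy).2.2.2, ih hr s⟩
    · rw [pvSd, if_neg h]; exact ih hr cur

-- the ordered start list A sorts is exactly 1 followed by B's selected subsequence
lemma pv_ordered_eq (pc : Int) (ss : List Int) :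
    PySem.List.sorted
      (ss.foldl (fun st page => if 1 ≤ page ∧ page ≤ pc then PySem.Set.add st page else st)
        (PySem.Set.ofList [1])) (fun x => x) false
      = 1 :: pvSd pc 1 (PySem.List.sorted ss (fun x => x) false) := by
  set M := PySem.List.sorted ss (fun x => x) false with hMdef
  have hMsorted : M.Pairwise (· ≤ ·) := by simpa using PySem.List.sorted_pairwise ss (fun x => x)
  have hMperm : M.Perm ss := PySem.List.sorted_perm ss (fun x => x) false
  set starts := ss.foldl (fun st page => if 1 ≤ page ∧ page ≤ pc then PySem.Set.add st page else st)
      (PySem.Set.ofList [1]) with hstarts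
  have hmem : ∀ x, x ∈ (1 :: pvSd pc 1 M) ↔ x ∈ starts := by
    intro x
    rw [hstarts, pv_mem_startsFold]
    simp only [List.mem_cons, pv_mem_sd pc M hMsorted, PySem.Set.mem_ofList]
    constructor
    · rintro (rfl | ⟨hm, h1, h2, h3⟩)
      · exact Or.inl (by simp)
      · exact Or.inr ⟨hMperm.mem_iff.mp hm, h1, h2⟩
    · rintro (h1 | ⟨hm, h1, h2⟩)
      · simp at h1; exact Or.inl h1
      · by_cases hx1 : x = 1
        · exact Or.inl hx1
        · exact Or.inr ⟨hMperm.mem_iff.mpr hm, h1, h2, by omega⟩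
  have hpw : (1 :: pvSd pc 1 M).Pairwise (· < ·) := by
    rw [List.pairwise_cons]
    exact ⟨fun y hy => ((pv_mem_sd pc M hMsorted 1 y).mp hy).2.2.2, pv_sd_pairwise pc M hMsorted 1⟩
  have hnodup1 : (1 :: pvSd pc 1 M).Nodup := hpw.imp (fun h => ne_of_lt h)
  have hnodup2 : starts.Nodup := pv_nodup_startsFold pc ss _ (PySem.Set.nodup_ofList [1])
  have hperm : (1 :: pvSd pc 1 M).Perm starts :=
    (List.perm_ext_iff_of_nodup hnodup1 hnodup2).mpr hmem
  exact PySem.List.sorted_eq_of_perm_of_pairwise_lt starts (1 :: pvSd pc 1 M) (fun x => x) hperm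
    (by simpa using hpw)

-- ===== VERDICT (by name: the statement is the Claim_ definition above) =====
theorem compute_sections_spec : Claim_equal_compute_sections := by
  intro pc ss _
  unfold Spec_compute_sections compute_sections compute_sections_alt
  by_cases hpc : pc ≤ 0
  · simp [hpc]
  · rw [if_neg hpc, if_neg hpc]
    have hB := pvB_loop pc (PySem.List.sorted ss (fun x => x) false) [] 1
    simp only [List.nil_append] at hB
    have hA := pvA_loop pc
      (PySem.List.sorted
        (ss.foldl (fun st page => if 1 ≤ page ∧ page ≤ pc then PySem.Set.add st page else st)
          (PySem.Set.ofList [1])) (fun x => x) false)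
      (PySem.List.sorted
        (ss.foldl (fun st page => if 1 ≤ page ∧ page ≤ pc then PySem.Set.add st page else st)
          (PySem.Set.ofList [1])) (fun x => x) false)
      0 [] (by simp)
    simp only [Int.natCast_zero, List.nil_append] at hA
    rw [hA, hB, pvG_eq_pairs, pv_ordered_eq pc ss]
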